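-- pv_equiv track=rewrite | github.com/KieronJones/Uni-of-York-Computer-Science | Year 1/SOF1/Week4/Practical3.py | pairwise_digits
-- ===== SOURCE A (Python) =====
-- def pairwise_digits(number_a, number_b):
--     output = ""
--     str_a = str(number_a)
--     str_b = str(number_b)
--     search_string = ""
--
--     if len(str_a) > len(str_b):
--         search_string = str_b
--     else:
--         search_string = str_a
--
--     for i in range(len(search_string)):
--         if str_a[i] == str_b[i]:
--             output += "1"
--         else:
--             output += "0"
--
--     num_zeros = abs(len(str_a) - len(str_b))
--
--     for i in range(num_zeros):
--         output += "0"
--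
--     return output
-- ===== SOURCE B (Python) =====
-- def pairwise_digits(number_a, number_b):
--     def go(a, b):
--         if not a and not b:
--             return ""
--         if not a or not b:
--             return "0" + go(a[1:], b[1:])
--         return ("1" if a[0] == b[0] else "0") + go(a[1:], b[1:])
--     return go(str(number_a), str(number_b))
-- ===== Notes on version B (the rewrite author's own statement) =====
-- stated objective: alternative
-- what changed: A's two index-driven loops (compare positions up to the shorter length, then a separate padding loop of |len difference| zeros) are replaced by an index-free structural recursion that peels both digit strings head-by-head; the trailing zeros emerge from the recursion's one-string-empty base case, with no lengths, indices or padding phase.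
import Mathlib
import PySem

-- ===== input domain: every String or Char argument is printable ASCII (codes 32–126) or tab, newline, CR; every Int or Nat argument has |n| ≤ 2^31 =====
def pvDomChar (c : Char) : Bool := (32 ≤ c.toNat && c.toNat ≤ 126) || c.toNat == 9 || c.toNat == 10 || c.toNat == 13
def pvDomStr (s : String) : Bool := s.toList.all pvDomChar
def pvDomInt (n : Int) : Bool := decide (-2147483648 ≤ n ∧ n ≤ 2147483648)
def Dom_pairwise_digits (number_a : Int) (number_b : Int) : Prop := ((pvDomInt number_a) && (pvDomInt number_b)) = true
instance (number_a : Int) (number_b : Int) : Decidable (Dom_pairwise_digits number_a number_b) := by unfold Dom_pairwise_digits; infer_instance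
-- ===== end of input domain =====

-- B replaces A's two index-driven loops (compare up to the shorter length, then pad) by an
-- index-free structural recursion peeling both digit strings head-by-head; the overhang zeros
-- fall out of the recursion's base cases (return value only; objective: alternative decomposition).

-- ===== PORT A =====
def pairwise_digits (number_a : Int) (number_b : Int) : String :=
  let str_a := (PySem.Int.toStr number_a).toList
  let str_b := (PySem.Int.toStr number_b).toList
  let search_string := if str_a.length > str_b.length then str_b else str_a
  let output := (List.range search_string.length).foldl
    (fun out i => if str_a[i]? = str_b[i]? then out ++ ['1'] else out ++ ['0']) []
  let num_zeros := ((str_a.length : Int) - (str_b.length : Int)).natAbs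
  let output := (List.range num_zeros).foldl (fun out _ => out ++ ['0']) output
  String.mk output

-- ===== PORT B =====
-- go a b: both empty -> ""; one empty -> '0' :: recurse on tails; else compare heads.
def pwGo : List Char → List Char → List Char
  | [], [] => []
  | [], _ :: b => '0' :: pwGo [] b
  | _ :: a, [] => '0' :: pwGo a []
  | x :: a, y :: b => (if x = y then '1' else '0') :: pwGo a b

def pairwise_digits_alt (number_a : Int) (number_b : Int) : String :=
  String.mk (pwGo (PySem.Int.toStr number_a).toList (PySem.Int.toStr number_b).toList)

-- ===== PRECONDITION & SPEC =====
def Spec_pairwise_digits (number_a : Int) (number_b : Int) (out : String) : Prop := out = pairwise_digits_alt number_a number_b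
instance (number_a : Int) (number_b : Int) (out : String) : Decidable (Spec_pairwise_digits number_a number_b out) := by unfold Spec_pairwise_digits; infer_instance

-- ===== CLAIM =====
def Claim_equal_pairwise_digits : Prop := ∀ (number_a : Int) (number_b : Int), Dom_pairwise_digits number_a number_b → Spec_pairwise_digits number_a number_b (pairwise_digits number_a number_b)

-- ===== LEMMAS AND PROOFS =====

lemma foldl_app_if (la lb : List Char) (k : Nat) (acc : List Char) :
    (List.range k).foldl
      (fun out i => if la[i]? = lb[i]? then out ++ ['1'] else out ++ ['0']) acc
    = acc ++ (List.range k).map (fun i => if la[i]? = lb[i]? then '1' else '0') := by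
  induction k generalizing acc with
  | zero => simp
  | succ k ih =>
    simp only [List.range_succ, List.foldl_append, List.foldl_cons, List.foldl_nil, ih,
      List.map_append]
    split <;> simp_all

lemma foldl_zeros (k : Nat) (acc : List Char) :
    (List.range k).foldl (fun out _ => out ++ ['0']) acc
    = acc ++ List.replicate k '0' := by
  induction k generalizing acc with
  | zero => simp
  | succ k ih => simp [List.range_succ, ih, List.replicate_succ']

-- B's recursion computes the same character list as the full-length map.
lemma pwGo_eq_map (la lb : List Char) :
    pwGo la lb = (List.range (max la.length lb.length)).map (fun i =>
      if i < la.length ∧ i < lb.length ∧ la[i]? = lb[i]? then '1' else '0') := by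
  induction la generalizing lb with
  | nil =>
    induction lb with
    | nil => simp [pwGo]
    | cons y b ihb =>
      simp [pwGo, ihb, List.range_succ_eq_map, Function.comp_def]
  | cons x a iha =>
    cases lb with
    | nil =>
      simp only [pwGo, iha [], List.length_nil, List.length_cons,
        Nat.max_eq_left (Nat.zero_le _), List.range_succ_eq_map, List.map_cons, List.map_map]
      simp [List.map_const', Function.comp_def, List.eq_replicate_iff]
    | cons y b =>
      simp only [pwGo, iha b, List.length_cons, Nat.succ_max_succ,
        List.range_succ_eq_map, List.map_cons, List.map_map]
      congr 1
      · by_cases h : x = y <;> simp [h]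
      · apply List.map_congr_left; intro i _
        simp only [Function.comp_apply, List.getElem?_cons_succ]
        by_cases h1 : i < a.length <;> by_cases h2 : i < b.length <;>
          simp [h1, h2]

-- A's two loops compute the same character list as the full-length map.
lemma core (la lb : List Char) :
    (let m := (if la.length > lb.length then lb else la).length
     (List.range m).foldl
       (fun out i => if la[i]? = lb[i]? then out ++ ['1'] else out ++ ['0']) []
       ++ List.replicate (((la.length : Int) - (lb.length : Int)).natAbs) '0')
    = (List.range (max la.length lb.length)).map (fun i =>
        if i < la.length ∧ i < lb.length ∧ la[i]? = lb[i]? then '1' else '0') := by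
  have hm : (if la.length > lb.length then lb else la).length
      = min la.length lb.length := by split <;> omega
  have hz : (((la.length : Int) - (lb.length : Int)).natAbs)
      = max la.length lb.length - min la.length lb.length := by omega
  rw [hm, hz]
  dsimp only
  rw [foldl_app_if, List.nil_append]
  have hsplit : max la.length lb.length
      = min la.length lb.length + (max la.length lb.length - min la.length lb.length) := by
    omega
  rw [hsplit, List.range_add, List.map_append]
  congr 1
  · apply List.map_congr_left
    intro i hi
    simp only [List.mem_range] at hi
    have h1 : i < la.length := by omega
    have h2 : i < lb.length := by omega
    simp [h1, h2]
  · have hk : min la.length lb.length + (max la.length lb.length - min la.length lb.length)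
        - min la.length lb.length = max la.length lb.length - min la.length lb.length := by
      omega
    rw [hk]
    symm
    rw [List.eq_replicate_iff]
    refine ⟨by simp, ?_⟩
    intro c hc
    simp only [List.mem_map, List.mem_range] at hc
    obtain ⟨i, ⟨a, ha, rfl⟩, hc⟩ := hc
    have hneg : ¬ (min la.length lb.length + a < la.length ∧
        min la.length lb.length + a < lb.length ∧
        la[min la.length lb.length + a]? = lb[min la.length lb.length + a]?) := by
      rintro ⟨h1, h2, -⟩; omega
    rw [if_neg hneg] at hc
    exact hc.symm

-- ===== VERDICT =====
theorem pairwise_digits_spec : Claim_equal_pairwise_digits := by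
  intro a b _
  unfold Spec_pairwise_digits pairwise_digits pairwise_digits_alt
  simp only [foldl_zeros]
  rw [pwGo_eq_map]
  exact congrArg String.mk (core _ _)
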